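-- pv_equiv track=rewrite | github.com/Snowwpanda/adventofcode | adventofcode24/21/21.py | indirect_input
-- ===== SOURCE A (Python) =====
-- def indirect_input(code, pos):
--     if len(code) == 0:
--         return ''
--     button_pos = code.pop(0)
--     instr = ''
--
--     # while a sequence of move and press buttons may have the same number of inputs, somehow the order is important.
--     # because the '<' is the most annoying key, we want to press it first and generally want to do '<v>' moves first. But we cannot cross the empty field ad (-2,0)
--     # and making a zigzag would be worse. So manual fix.
--     # Order should be < v  ^ > unless blocked, then '>', '^' and 'v' first.
--
--     if (button_pos[1] == 0 and pos[0] == -2) or (button_pos[0] == -2 and pos[1] == 0):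
--         while pos[0] < button_pos[0]:
--             instr += '>'
--             pos[0] += 1
--         while pos[1] < button_pos[1]:
--             instr += '^'
--             pos[1] += 1
--         while pos[1] > button_pos[1]:
--             instr += 'v'
--             pos[1] -= 1
--         while pos[0] > button_pos[0]:
--             instr += '<'
--             pos[0] -= 1
--     else:
--         while pos[0] > button_pos[0]:
--             instr += '<'
--             pos[0] -= 1
--         while pos[1] > button_pos[1]:
--             instr += 'v'
--             pos[1] -= 1
--         while pos[1] < button_pos[1]:
--             instr += '^'
--             pos[1] += 1
--         while pos[0] < button_pos[0]:
--             instr += '>'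
--             pos[0] += 1
--     instr += 'A'
--     return instr + indirect_input(code, pos)
-- ===== SOURCE B (Python) =====
-- def indirect_input(code, pos):
--     # Return-value equivalent to A; unlike A it does not mutate code/pos.
--     if not code:
--         return ''
--     px, py = pos[0], pos[1]
--     parts = []
--     for b in code:
--         bx, by = b[0], b[1]
--         if (by == 0 and px == -2) or (bx == -2 and py == 0):
--             seq = '>' * (bx - px) + '^' * (by - py) + 'v' * (py - by) + '<' * (px - bx)
--         else:
--             seq = '<' * (px - bx) + 'v' * (py - by) + '^' * (by - py) + '>' * (bx - px)
--         parts.append(seq + 'A')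
--         px, py = bx, by
--     return ''.join(parts)
-- ===== Notes on version B (the rewrite author's own statement) =====
-- stated objective: faster
-- what changed: Replaced A's head-pop recursion with four character-at-a-time while loops and repeated string concatenation by a single iterative pass that builds each segment with closed-form string repetition ('<'*(px-bx) etc.) and joins the parts once; B does not mutate code or pos.
import Mathlib
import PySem

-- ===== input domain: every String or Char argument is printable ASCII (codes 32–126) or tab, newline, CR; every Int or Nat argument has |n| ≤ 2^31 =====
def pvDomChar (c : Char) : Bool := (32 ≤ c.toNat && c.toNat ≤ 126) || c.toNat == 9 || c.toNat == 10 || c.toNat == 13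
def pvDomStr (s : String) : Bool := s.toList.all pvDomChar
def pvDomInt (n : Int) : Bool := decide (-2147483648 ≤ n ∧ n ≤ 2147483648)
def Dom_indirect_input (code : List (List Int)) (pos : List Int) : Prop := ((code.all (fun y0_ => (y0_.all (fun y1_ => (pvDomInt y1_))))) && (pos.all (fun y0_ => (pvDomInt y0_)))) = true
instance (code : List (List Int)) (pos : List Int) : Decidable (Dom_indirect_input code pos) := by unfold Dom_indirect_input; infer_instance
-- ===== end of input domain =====

-- B replaces A's recursion and four character-at-a-time while loops by one iterative pass
-- with closed-form string repetition; B does not mutate `code`/`pos` (equivalence is about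
-- the return value only).

-- ===== PORT A =====
-- `while p < t: instr += c; p += 1` — returns the accumulated string and the final p
def whileInc (c : Char) (p t : Int) : String × Int :=
  if p < t then
    let r := whileInc c (p + 1) t
    (String.ofList [c] ++ r.1, r.2)
  else ("", p)
termination_by (t - p).toNat
decreasing_by omega

-- `while p > t: instr += c; p -= 1`
def whileDec (c : Char) (p t : Int) : String × Int :=
  if t < p then
    let r := whileDec c (p - 1) t
    (String.ofList [c] ++ r.1, r.2)
  else ("", p)
termination_by (p - t).toNat
decreasing_by omega

def indirect_input (code : List (List Int)) (pos : List Int) : String :=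
  match code with
  | [] => ""
  | bp :: rest =>
    let px := pos.getD 0 0
    let py := pos.getD 1 0
    let bx := bp.getD 0 0
    let by_ := bp.getD 1 0
    if (by_ == 0 && px == -2) || (bx == -2 && py == 0) then
      let r1 := whileInc '>' px bx
      let r2 := whileInc '^' py by_
      let r3 := whileDec 'v' r2.2 by_
      let r4 := whileDec '<' r1.2 bx
      r1.1 ++ r2.1 ++ r3.1 ++ r4.1 ++ "A" ++ indirect_input rest [r4.2, r3.2]
    else
      let r1 := whileDec '<' px bx
      let r2 := whileDec 'v' py by_
      let r3 := whileInc '^' r2.2 by_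
      let r4 := whileInc '>' r1.2 bx
      r1.1 ++ r2.1 ++ r3.1 ++ r4.1 ++ "A" ++ indirect_input rest [r4.2, r3.2]

-- ===== PORT B =====
-- `c * n` for a possibly negative n (Python string repetition)
def repChar (c : Char) (n : Int) : String := String.ofList (List.replicate n.toNat c)

def altGo (code : List (List Int)) (px py : Int) : List String :=
  match code with
  | [] => []
  | bp :: rest =>
    let bx := bp.getD 0 0
    let by_ := bp.getD 1 0
    let seq :=
      if (by_ == 0 && px == -2) || (bx == -2 && py == 0) then
        repChar '>' (bx - px) ++ repChar '^' (by_ - py) ++ repChar 'v' (py - by_) ++ repChar '<' (px - bx)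
      else
        repChar '<' (px - bx) ++ repChar 'v' (py - by_) ++ repChar '^' (by_ - py) ++ repChar '>' (bx - px)
    (seq ++ "A") :: altGo rest bx by_

def indirect_input_alt (code : List (List Int)) (pos : List Int) : String :=
  match code with
  | [] => ""
  | _ :: _ => String.join (altGo code (pos.getD 0 0) (pos.getD 1 0))

-- ===== PRECONDITION & SPEC =====
-- Pre_ excludes exactly the inputs where A raises IndexError: a nonempty code with pos
-- shorter than 2, or some button with fewer than 2 coordinates.
def Pre_indirect_input (code : List (List Int)) (pos : List Int) : Prop :=
  (code = [] ∨ 2 ≤ pos.length) ∧ ∀ c ∈ code, 2 ≤ c.length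
instance (code : List (List Int)) (pos : List Int) : Decidable (Pre_indirect_input code pos) := by unfold Pre_indirect_input; infer_instance

def pvWitness_indirect_input : List (List Int) × List Int := ([[1, 2], [-2, 0]], [0, 0])

def Spec_indirect_input (code : List (List Int)) (pos : List Int) (out : String) : Prop := out = indirect_input_alt code pos
instance (code : List (List Int)) (pos : List Int) (out : String) : Decidable (Spec_indirect_input code pos out) := by unfold Spec_indirect_input; infer_instance

-- ===== CLAIM (what is proved, stated in full; the proofs are below) =====
def Claim_equal_indirect_input : Prop := ∀ (code : List (List Int)) (pos : List Int), Dom_indirect_input code pos → Pre_indirect_input code pos → Spec_indirect_input code pos (indirect_input code pos)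

-- ===== LEMMAS AND PROOFS =====

lemma repChar_congr (c : Char) {m n : Int} (h : m.toNat = n.toNat) : repChar c m = repChar c n := by
  simp [repChar, h]

lemma whileInc_eq (c : Char) (p t : Int) : whileInc c p t = (repChar c (t - p), max p t) := by
  rw [whileInc]
  split_ifs with hlt
  · show (String.ofList [c] ++ (whileInc c (p + 1) t).1, (whileInc c (p + 1) t).2)
        = (repChar c (t - p), max p t)
    rw [whileInc_eq c (p + 1) t]
    have h1 : (t - p).toNat = (t - (p + 1)).toNat + 1 := by omega
    refine Prod.ext ?_ ?_
    · simp [repChar, h1, List.replicate_succ, ← String.ofList_append]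
    · simp; omega
  · have h1 : (t - p).toNat = 0 := by omega
    refine Prod.ext ?_ ?_
    · simp [repChar, h1]
    · simp; omega
termination_by (t - p).toNat
decreasing_by omega

lemma whileDec_eq (c : Char) (p t : Int) : whileDec c p t = (repChar c (p - t), min p t) := by
  rw [whileDec]
  split_ifs with hlt
  · show (String.ofList [c] ++ (whileDec c (p - 1) t).1, (whileDec c (p - 1) t).2)
        = (repChar c (p - t), min p t)
    rw [whileDec_eq c (p - 1) t]
    have h1 : (p - t).toNat = (p - 1 - t).toNat + 1 := by omega
    refine Prod.ext ?_ ?_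
    · simp [repChar, h1, List.replicate_succ, ← String.ofList_append]
    · simp; omega
  · have h1 : (p - t).toNat = 0 := by omega
    refine Prod.ext ?_ ?_
    · simp [repChar, h1]
    · simp; omega
termination_by (p - t).toNat
decreasing_by omega

lemma foldl_append_init (a : String) (l : List String) :
    List.foldl (fun r s => r ++ s) a l = a ++ List.foldl (fun r s => r ++ s) "" l := by
  induction l generalizing a with
  | nil => simp
  | cons s t ih => simp only [List.foldl_cons]; rw [ih (a ++ s), ih ("" ++ s)]; simp [String.append_assoc]

lemma join_cons (a : String) (l : List String) : String.join (a :: l) = a ++ String.join l := by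
  simp only [String.join, List.foldl_cons]
  rw [foldl_append_init]
  simp

lemma indirect_main (code : List (List Int)) (px py : Int) :
    indirect_input code [px, py] = String.join (altGo code px py) := by
  induction code generalizing px py with
  | nil => simp [indirect_input, altGo, String.join]
  | cons bp rest ih =>
    simp only [indirect_input, altGo, whileInc_eq, whileDec_eq, List.getD_cons_zero,
      List.getD_cons_succ]
    split_ifs with hb
    · rw [repChar_congr 'v' (show (max py (bp.getD 1 0) - bp.getD 1 0).toNat = (py - bp.getD 1 0).toNat by omega),
        repChar_congr '<' (show (max px (bp.getD 0 0) - bp.getD 0 0).toNat = (px - bp.getD 0 0).toNat by omega)]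
      have e1 : min (max px (bp.getD 0 0)) (bp.getD 0 0) = bp.getD 0 0 := by omega
      have e2 : min (max py (bp.getD 1 0)) (bp.getD 1 0) = bp.getD 1 0 := by omega
      rw [e1, e2, ih]
      rw [join_cons]
    · rw [repChar_congr '^' (show (bp.getD 1 0 - min py (bp.getD 1 0)).toNat = (bp.getD 1 0 - py).toNat by omega),
        repChar_congr '>' (show (bp.getD 0 0 - min px (bp.getD 0 0)).toNat = (bp.getD 0 0 - px).toNat by omega)]
      have e1 : max (min px (bp.getD 0 0)) (bp.getD 0 0) = bp.getD 0 0 := by omega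
      have e2 : max (min py (bp.getD 1 0)) (bp.getD 1 0) = bp.getD 1 0 := by omega
      rw [e1, e2, ih]
      rw [join_cons]

-- ===== VERDICT (by name: the statement is the Claim_ definition above) =====
theorem indirect_input_spec : Claim_equal_indirect_input := by
  intro code pos _ _
  unfold Spec_indirect_input
  cases code with
  | nil => rfl
  | cons bp rest =>
    show indirect_input (bp :: rest) pos = indirect_input_alt (bp :: rest) pos
    have h : indirect_input (bp :: rest) pos
        = indirect_input (bp :: rest) [pos.getD 0 0, pos.getD 1 0] := by
      simp [indirect_input]
    rw [h, indirect_main]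
    rfl
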